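-- pv_equiv track=rewrite | github.com/ethereum/research | randao_analysis/low_influence/2of3.py | is_marginal
-- ===== SOURCE A (Python) =====
-- def winner(val, depth):
--     if depth == 0:
--         return val & 1
--     subwinners = [
--         winner(val, depth-1),
--         winner(val >> (3**(depth-1)), depth-1),
--         winner(val >> (3**(depth-1) * 2), depth-1)
--     ]
--     return 1 if sum(subwinners) >= 2 else 0
--
-- def is_marginal(val, depth):
--     if depth == 0:
--         return True
--     s1, s2, s3 = val, val >> (3**(depth-1)), val >> (3**(depth-1) * 2)
--     w1, w2, w3 = (
--         winner(s1, depth-1),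
--         winner(s2, depth-1),
--         winner(s3, depth-1)
--     )
--     if w1 == w2 and w2 == w3:
--         return False
--
--     dominants = (s2, s3) if (w1 != w2 and w1 != w3) else \
--                 (s1, s3) if (w2 != w1 and w2 != w3) else \
--                 (s1, s2) if (w3 != w1 and w3 != w2) else \
--                 False
--
--     return is_marginal(dominants[0], depth-1) or \
--            is_marginal(dominants[1], depth-1)
-- ===== SOURCE B (Python) =====
-- def _solve(val, depth):
--     if depth == 0:
--         return (val & 1, True)
--     k = 3 ** (depth - 1)
--     r0 = _solve(val, depth - 1)
--     r1 = _solve(val >> k, depth - 1)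
--     r2 = _solve(val >> (2 * k), depth - 1)
--     w = 1 if r0[0] + r1[0] + r2[0] >= 2 else 0
--     if r0[0] == r1[0] == r2[0]:
--         return (w, False)
--     m = [r for r in (r0, r1, r2) if r[0] == w]
--     return (w, m[0][1] or m[1][1])
--
-- def is_marginal(val, depth):
--     return _solve(val, depth)[1]
-- ===== Notes on version B (the rewrite author's own statement) =====
-- stated objective: alternative
-- what changed: B replaces A's two separate recursions (winner, then is_marginal re-calling winner at every node) by one recursive helper that returns (winner, marginal) for each subtree in a single traversal, picking the agreeing pair by filtering on the node winner.
import Mathlib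
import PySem

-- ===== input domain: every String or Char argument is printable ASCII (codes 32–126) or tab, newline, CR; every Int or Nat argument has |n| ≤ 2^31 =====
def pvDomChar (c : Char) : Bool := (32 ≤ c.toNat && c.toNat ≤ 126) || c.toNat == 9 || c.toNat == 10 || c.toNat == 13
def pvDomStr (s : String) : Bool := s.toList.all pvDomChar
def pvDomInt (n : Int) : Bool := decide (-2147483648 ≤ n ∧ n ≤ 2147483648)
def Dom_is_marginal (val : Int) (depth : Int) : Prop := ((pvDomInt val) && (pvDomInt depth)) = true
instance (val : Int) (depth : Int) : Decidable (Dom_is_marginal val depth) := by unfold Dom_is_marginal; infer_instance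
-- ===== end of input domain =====

-- B merges the two recursions (winner and marginality) into one helper returning both;
-- return-value equivalence on depth ≥ 0 (objective: alternative decomposition, not claimed faster).

-- ===== PORT A =====
-- Python 'val >> k' (k ≥ 0) is exactly floor division by 2^k.
def pyShr (v : Int) (k : Nat) : Int := PySem.Int.floordiv v ((2 : Int) ^ k)

-- recursion is on depth, a nonnegative int inside Pre_; ported over Nat
def winnerA (val : Int) : Nat → Int
  | 0 => PySem.Int.mod val 2   -- val & 1 on an int = floor-mod 2, exact
  | d + 1 =>
    let subwinners := [winnerA val d, winnerA (pyShr val (3 ^ d)) d, winnerA (pyShr val (3 ^ d * 2)) d]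
    if subwinners.sum ≥ 2 then 1 else 0

def margA (val : Int) : Nat → Bool
  | 0 => true
  | d + 1 =>
    let s1 := val; let s2 := pyShr val (3 ^ d); let s3 := pyShr val (3 ^ d * 2)
    let w1 := winnerA s1 d; let w2 := winnerA s2 d; let w3 := winnerA s3 d
    if w1 = w2 ∧ w2 = w3 then false
    else
      let dominants :=
        if w1 ≠ w2 ∧ w1 ≠ w3 then (s2, s3)
        else if w2 ≠ w1 ∧ w2 ≠ w3 then (s1, s3)
        else (s1, s2)   -- Python's final 'False' alternative is unreachable (it would raise); any value
      margA dominants.1 d || margA dominants.2 d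

def is_marginal (val : Int) (depth : Int) : Bool := margA val depth.toNat

-- ===== PORT B =====
def solveB (val : Int) : Nat → Int × Bool
  | 0 => (PySem.Int.mod val 2, true)
  | d + 1 =>
    let k := 3 ^ d
    let r0 := solveB val d
    let r1 := solveB (pyShr val k) d
    let r2 := solveB (pyShr val (2 * k)) d
    let w : Int := if r0.1 + r1.1 + r2.1 ≥ 2 then 1 else 0
    if r0.1 = r1.1 ∧ r1.1 = r2.1 then (w, false)
    else
      let m := [r0, r1, r2].filter (fun r => r.1 == w)
      (w, ((PySem.List.pyGet? m 0).map Prod.snd).getD false ||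
          ((PySem.List.pyGet? m 1).map Prod.snd).getD false)

def is_marginal_alt (val : Int) (depth : Int) : Bool := (solveB val depth.toNat).2

-- ===== PRECONDITION & SPEC =====
-- A raises on depth < 0 (3**(depth-1) is a float, '>>' then raises TypeError)
def Pre_is_marginal (val : Int) (depth : Int) : Prop := 0 ≤ depth
instance (val : Int) (depth : Int) : Decidable (Pre_is_marginal val depth) := by unfold Pre_is_marginal; infer_instance
def pvWitness_is_marginal : Int × Int := (1234, 2)

def Spec_is_marginal (val : Int) (depth : Int) (out : Bool) : Prop := out = is_marginal_alt val depth
instance (val : Int) (depth : Int) (out : Bool) : Decidable (Spec_is_marginal val depth out) := by unfold Spec_is_marginal; infer_instance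

-- ===== CLAIM (what is proved, stated in full; the proofs are below) =====
def Claim_equal_is_marginal : Prop := ∀ (val : Int) (depth : Int), Dom_is_marginal val depth → Pre_is_marginal val depth → Spec_is_marginal val depth (is_marginal val depth)

-- ===== LEMMAS AND PROOFS =====

lemma winnerA_01 (val : Int) (d : Nat) : winnerA val d = 0 ∨ winnerA val d = 1 := by
  cases d with
  | zero =>
    have h := PySem.Int.mod_nonneg val (b := 2) (by norm_num)
    have h2 := PySem.Int.mod_lt val (b := 2) (by norm_num)
    simp [winnerA]; omega
  | succ d => simp only [winnerA]; split <;> simp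

lemma solveB_eq (val : Int) (d : Nat) :
    solveB val d = (winnerA val d, margA val d) := by
  induction d generalizing val with
  | zero => simp [solveB, winnerA, margA]
  | succ d ih =>
    simp only [solveB, winnerA, margA, ih, show 2 * 3 ^ d = 3 ^ d * 2 from Nat.mul_comm _ _]
    rcases winnerA_01 val d with h1 | h1 <;>
    rcases winnerA_01 (pyShr val (3 ^ d)) d with h2 | h2 <;>
    rcases winnerA_01 (pyShr val (3 ^ d * 2)) d with h3 | h3 <;>
      simp [h1, h2, h3, List.filter, PySem.List.pyGet?, PySem.List.pyIdx?,
        List.sum]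

-- ===== VERDICT (by name: the statement is the Claim_ definition above) =====
theorem is_marginal_spec : Claim_equal_is_marginal := by
  intro val depth _ _
  unfold Spec_is_marginal is_marginal is_marginal_alt
  rw [solveB_eq]
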